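-- pv_equiv track=rewrite | github.com/eufrat987/daily-alg-task | 11.21/longest-increasing-subsequence.py | getIdxs
-- ===== SOURCE A (Python) =====
-- def getIdxs(arr):
--     sidxs = []
--     m = min(arr)
--     lm = None
--
--     for i in range(len(arr)):
--         n = arr[i]
--         if lm is None:
--             lm = n
--             sidxs.append(i)
--         elif n < lm:
--             lm = n
--             sidxs.append(i)
--         if n == m: break
--
--     return sidxs
-- ===== SOURCE B (Python) =====
-- def getIdxs(arr):
--     # prefix-minimum table, then emit index 0 and every strict drop
--     prefix = []
--     cur = arr[0]
--     for n in arr: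
--         cur = min(cur, n)
--         prefix.append(cur)
--     return [0] + [i for i in range(1, len(arr)) if prefix[i] < prefix[i - 1]]
-- ===== Notes on version B (the rewrite author's own statement) =====
-- stated objective: alternative
-- what changed: Replaces the single stateful loop (None sentinel, running last-min, early break at the global minimum) by building a prefix-minimum table in one pass and then emitting index 0 plus every index where the table strictly drops.
import Mathlib
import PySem

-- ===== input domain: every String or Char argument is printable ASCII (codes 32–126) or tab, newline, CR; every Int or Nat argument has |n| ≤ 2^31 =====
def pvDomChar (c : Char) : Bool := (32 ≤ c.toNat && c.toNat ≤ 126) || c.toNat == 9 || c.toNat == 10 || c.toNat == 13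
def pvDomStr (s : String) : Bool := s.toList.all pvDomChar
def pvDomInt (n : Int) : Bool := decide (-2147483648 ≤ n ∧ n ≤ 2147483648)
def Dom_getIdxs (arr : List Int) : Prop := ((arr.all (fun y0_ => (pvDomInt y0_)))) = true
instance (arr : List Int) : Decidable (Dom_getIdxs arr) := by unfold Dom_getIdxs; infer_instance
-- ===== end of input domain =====

-- B replaces A's stateful loop (None sentinel, running min, early break) by a prefix-minimum
-- table plus a strict-drop scan; same cost, different decomposition (objective: alternative).

-- ===== PORT A =====
-- the for-loop of A: index i, last-min lm (None sentinel), accumulator sidxs, break at n = m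
def getIdxsGo (arr : List Int) (m : Int) (i : Nat) (lm : Option Int) (sidxs : List Int) : List Int :=
  if h : i < arr.length then
    let n := arr.getD i 0       -- arr[i], i in range so getD is exact
    let st : Option Int × List Int :=
      match lm with
      | none => (some n, sidxs ++ [(i : Int)])
      | some l => if n < l then (some n, sidxs ++ [(i : Int)]) else (some l, sidxs)
    if n = m then st.2 else getIdxsGo arr m (i+1) st.1 st.2
  else sidxs
termination_by arr.length - i

def getIdxs (arr : List Int) : List Int :=
  match PySem.List.min? arr (fun x => x) with
  | none => []                  -- min([]) raises ValueError in Python; excluded by Pre_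
  | some m => getIdxsGo arr m 0 none []

-- ===== PORT B =====
-- the prefix-table loop of Source B: carries (cur, prefix)
def pvScanStep (st : Int × List Int) (n : Int) : Int × List Int :=
  (min st.1 n, st.2 ++ [min st.1 n])

def getIdxs_alt (arr : List Int) : List Int :=
  match arr with
  | [] => []                    -- arr[0] raises IndexError in Python; excluded by Pre_
  | a :: _ =>
    let pf := (arr.foldl pvScanStep (a, ([] : List Int))).2
    (0 : Int) :: (List.range' 1 (arr.length - 1)).filterMap
      (fun i => if pf.getD i 0 < pf.getD (i - 1) 0 then some ((i : Nat) : Int) else none)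

-- ===== PRECONDITION & SPEC =====
-- Pre_ excludes only the empty list, on which A raises ValueError (min([])).
def Pre_getIdxs (arr : List Int) : Prop := arr ≠ []
instance (arr : List Int) : Decidable (Pre_getIdxs arr) := by unfold Pre_getIdxs; infer_instance
def pvWitness_getIdxs : List Int := [3, 1, 2, 0, 5]

def Spec_getIdxs (arr : List Int) (out : List Int) : Prop := out = getIdxs_alt arr
instance (arr : List Int) (out : List Int) : Decidable (Spec_getIdxs arr out) := by unfold Spec_getIdxs; infer_instance

-- ===== CLAIM (what is proved, stated in full; the proofs are below) =====
def Claim_equal_getIdxs : Prop := ∀ (arr : List Int), Dom_getIdxs arr → Pre_getIdxs arr → Spec_getIdxs arr (getIdxs arr)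

-- ===== LEMMAS AND PROOFS =====

-- the sequence of prefix minima of xs starting from cur
def pvScanMin (cur : Int) : List Int → List Int
  | [] => []
  | x :: xs => min cur x :: pvScanMin (min cur x) xs

-- min of cur and the first j+1 elements of xs
def pvRunMin (cur : Int) : List Int → Nat → Int
  | [], _ => cur
  | x :: _, 0 => min cur x
  | x :: xs, j+1 => pvRunMin (min cur x) xs j

theorem pvFoldl_scan (xs : List Int) : ∀ (cur : Int) (acc : List Int),
    (xs.foldl pvScanStep (cur, acc)).2 = acc ++ pvScanMin cur xs := by
  induction xs with
  | nil => intro cur acc; simp [pvScanMin]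
  | cons x xs ih =>
    intro cur acc
    simp only [List.foldl_cons, pvScanStep, pvScanMin, ih]
    simp

theorem pvScanMin_getD (xs : List Int) : ∀ (cur : Int) (j : Nat), j < xs.length →
    (pvScanMin cur xs).getD j 0 = pvRunMin cur xs j := by
  induction xs with
  | nil => intro cur j h; simp at h
  | cons x xs ih =>
    intro cur j h
    cases j with
    | zero => simp [pvScanMin, pvRunMin]
    | succ j =>
      simp only [pvScanMin, pvRunMin, List.getD_cons_succ]
      exact ih (min cur x) j (by simpa using h)

theorem pvRunMin_succ (j : Nat) : ∀ (xs : List Int) (cur : Int), j + 1 < xs.length →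
    pvRunMin cur xs (j+1) = min (pvRunMin cur xs j) (xs.getD (j+1) 0) := by
  induction j with
  | zero =>
    intro xs cur h
    match xs, h with
    | x :: y :: xs, _ => simp [pvRunMin]
  | succ j ih =>
    intro xs cur h
    match xs, h with
    | x :: xs, h =>
      simp only [pvRunMin, List.getD_cons_succ]
      exact ih xs (min cur x) (by simpa using h)

-- once the running min reaches m (a lower bound of arr), it stays m
theorem pvRunMin_const (arr : List Int) (m c : Int)
    (hlb : ∀ j, j < arr.length → m ≤ arr.getD j 0) :
    ∀ i j, i ≤ j → j < arr.length → pvRunMin c arr i = m → pvRunMin c arr j = m := by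
  intro i j hij hjl hi
  induction j, hij using Nat.le_induction with
  | base => exact hi
  | succ j hij ih =>
    have hj : j < arr.length := by omega
    rw [pvRunMin_succ j arr c hjl, ih hj]
    exact min_eq_left (hlb (j+1) hjl)

-- the main loop invariant: from index i ≥ 1 with last-min l = prefix-min of i-1 and m < l,
-- A's loop produces exactly the strict-drop indices in [i, i+k)
theorem pvMainA (arr : List Int) (m : Int)
    (hlb : ∀ j, j < arr.length → m ≤ arr.getD j 0) :
    ∀ (k i : Nat) (l : Int) (acc : List Int), i + k = arr.length → 1 ≤ i → m < l →
      l = pvRunMin (arr.getD 0 0) arr (i-1) →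
      getIdxsGo arr m i (some l) acc =
        acc ++ (List.range' i k).filterMap (fun j =>
          if pvRunMin (arr.getD 0 0) arr j < pvRunMin (arr.getD 0 0) arr (j-1)
          then some ((j : Nat) : Int) else none) := by
  intro k
  induction k with
  | zero =>
    intro i l acc hik _ _ _
    rw [getIdxsGo]
    simp [show ¬ i < arr.length by omega]
  | succ k ih =>
    intro i l acc hik hi1 hml hl
    have hi : i < arr.length := by omega
    have hPi : pvRunMin (arr.getD 0 0) arr i = min l (arr.getD i 0) := by
      have : i - 1 + 1 = i := by omega
      rw [← this, pvRunMin_succ (i-1) arr _ (by omega), ← hl, this]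
    rw [getIdxsGo]
    simp only [dif_pos hi]
    rw [List.range'_succ, List.filterMap_cons]
    by_cases hn : arr.getD i 0 < l
    · have hPi' : pvRunMin (arr.getD 0 0) arr i = arr.getD i 0 := by
        rw [hPi]; exact min_eq_right (le_of_lt hn)
      have hcond : pvRunMin (arr.getD 0 0) arr i < pvRunMin (arr.getD 0 0) arr (i-1) := by
        rw [hPi', ← hl]; exact hn
      simp only [if_pos hn, if_pos hcond]
      by_cases hm : arr.getD i 0 = m
      · simp only [if_pos hm]
        have hnil : (List.range' (i+1) k).filterMap (fun j =>
            if pvRunMin (arr.getD 0 0) arr j < pvRunMin (arr.getD 0 0) arr (j-1)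
            then some ((j : Nat) : Int) else none) = [] := by
          rw [List.filterMap_eq_nil_iff]
          intro j hj
          rw [List.mem_range'_1] at hj
          have hji : i ≤ j - 1 := by omega
          have h1 : pvRunMin (arr.getD 0 0) arr j = m :=
            pvRunMin_const arr m _ hlb i j (by omega) (by omega) (by rw [hPi', hm])
          have h2 : pvRunMin (arr.getD 0 0) arr (j-1) = m :=
            pvRunMin_const arr m _ hlb i (j-1) hji (by omega) (by rw [hPi', hm])
          simp only [h1, h2, lt_self_iff_false, if_false]
        rw [hnil]
      · simp only [if_neg hm]
        have hmn : m < arr.getD i 0 := lt_of_le_of_ne (hlb i hi) (Ne.symm hm)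
        rw [ih (i+1) (arr.getD i 0) (acc ++ [(i : Int)]) (by omega) (by omega) hmn
            (by simpa using hPi'.symm)]
        simp
    · have hPi' : pvRunMin (arr.getD 0 0) arr i = l := by
        rw [hPi]; exact min_eq_left (by omega)
      have hcond : ¬ pvRunMin (arr.getD 0 0) arr i < pvRunMin (arr.getD 0 0) arr (i-1) := by
        rw [hPi', ← hl]; omega
      have hm : ¬ arr.getD i 0 = m := by
        intro h; omega
      simp only [if_neg hn, if_neg hm, if_neg hcond]
      exact ih (i+1) l acc (by omega) (by omega) hml (by simpa using hPi'.symm)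

-- ===== VERDICT (by name: the statement is the Claim_ definition above) =====
theorem getIdxs_spec : Claim_equal_getIdxs := by
  intro arr _ hpre
  unfold Spec_getIdxs
  match arr, hpre with
  | a :: rest, _ =>
    set arr := a :: rest with harr
    have hlen : 0 < arr.length := by simp [harr]
    obtain ⟨m, hm⟩ : ∃ m, PySem.List.min? arr (fun x => x) = some m := by
      cases h : PySem.List.min? arr (fun x => x) with
      | none => rw [PySem.List.min?_eq_none_iff] at h; simp [harr] at h
      | some m => exact ⟨m, rfl⟩
    have hlb : ∀ j, j < arr.length → m ≤ arr.getD j 0 := by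
      intro j hj
      have := PySem.List.min?_isMin hm (arr.getD j 0) ?_
      · exact this
      · rw [List.getD_eq_getElem arr 0 hj]; exact List.getElem_mem hj
    have ha0 : arr.getD 0 0 = a := by simp [harr]
    -- B side rewritten through pvRunMin
    have hB : getIdxs_alt arr = (0 : Int) :: (List.range' 1 (arr.length - 1)).filterMap
        (fun j => if pvRunMin (arr.getD 0 0) arr j < pvRunMin (arr.getD 0 0) arr (j-1)
          then some ((j : Nat) : Int) else none) := by
      rw [harr]
      simp only [getIdxs_alt]
      congr 1
      apply List.filterMap_congr
      intro j hj
      rw [List.mem_range'_1] at hj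
      have hj1 : 1 ≤ j := hj.1
      have hjl : j < (a :: rest).length := by
        have := hj.2; simp only [List.length_cons] at *; omega
      rw [pvFoldl_scan, List.nil_append, pvScanMin_getD _ _ _ hjl,
          pvScanMin_getD _ _ _ (by omega)]
      rw [harr] at ha0; rw [ha0]
    have hP0 : pvRunMin (arr.getD 0 0) arr 0 = a := by
      rw [ha0, harr]; simp [pvRunMin]
    -- A side: unfold the first iteration
    simp only [getIdxs, hm]
    rw [getIdxsGo]
    simp only [dif_pos hlen, ha0]
    by_cases ham : a = m
    · simp only [if_pos ham]
      rw [hB]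
      have hnil : (List.range' 1 (arr.length - 1)).filterMap
          (fun j => if pvRunMin (arr.getD 0 0) arr j < pvRunMin (arr.getD 0 0) arr (j-1)
            then some ((j : Nat) : Int) else none) = [] := by
        rw [List.filterMap_eq_nil_iff]
        intro j hj
        rw [List.mem_range'_1] at hj
        have h1 : pvRunMin (arr.getD 0 0) arr j = m :=
          pvRunMin_const arr m _ hlb 0 j (by omega) (by omega) (by rw [hP0, ham])
        have h2 : pvRunMin (arr.getD 0 0) arr (j-1) = m :=
          pvRunMin_const arr m _ hlb 0 (j-1) (by omega) (by omega) (by rw [hP0, ham])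
        simp only [h1, h2, lt_self_iff_false, if_false]
      rw [hnil]
      simp
    · simp only [if_neg ham]
      simp only [zero_add, List.nil_append, Nat.cast_zero]
      have hma : m < a := lt_of_le_of_ne (by simpa [ha0] using hlb 0 hlen) (Ne.symm ham)
      rw [pvMainA arr m hlb (arr.length - 1) 1 a [(0:Int)] (by omega) (by omega) hma
          (by simpa using hP0.symm), hB]
      simp
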